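-- pv_equiv track=rewrite | github.com/mmsuerkan/kubernetes-thesis | k8s-reflexion-service/src/nodes/learn.py | _classify_insight_type
-- ===== SOURCE A (Python) =====
-- def _classify_insight_type(insight: str) -> str:
--     """Classify the type of insight for appropriate handling"""
--     insight_lower = insight.lower()
--
--     if any(word in insight_lower for word in ["timing", "time", "delay", "duration"]):
--         return "temporal"
--     elif any(word in insight_lower for word in ["resource", "memory", "cpu", "limit"]):
--         return "resource_management"
--     elif any(word in insight_lower for word in ["context", "environment", "namespace", "cluster"]):
--         return "context_awareness"
--     elif any(word in insight_lower for word in ["strategy", "approach", "algorithm"]):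
--         return "strategy_optimization"
--     elif any(word in insight_lower for word in ["pattern", "correlation", "relationship"]):
--         return "pattern_recognition"
--     else:
--         return "general"
-- ===== SOURCE B (Python) =====
-- # B: flat keyword->rank map with a single min-accumulator pass (no grouped
-- # if/elif chain, no early return); the final rank indexes the category list.
-- _RANK = {
--     "timing": 0, "time": 0, "delay": 0, "duration": 0,
--     "resource": 1, "memory": 1, "cpu": 1, "limit": 1,
--     "context": 2, "environment": 2, "namespace": 2, "cluster": 2,
--     "strategy": 3, "approach": 3, "algorithm": 3,
--     "pattern": 4, "correlation": 4, "relationship": 4,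
-- }
-- _CATEGORIES = ["temporal", "resource_management", "context_awareness",
--                "strategy_optimization", "pattern_recognition", "general"]
--
-- def _classify_insight_type(insight: str) -> str:
--     s = insight.lower()
--     best = len(_CATEGORIES) - 1  # rank of "general"
--     for word, rank in _RANK.items():
--         if rank < best and word in s:
--             best = rank
--     return _CATEGORIES[best]
-- ===== Notes on version B (the rewrite author's own statement) =====
-- stated objective: alternative
-- what changed: Replaced the grouped if/elif chain with early returns by a flat keyword-to-rank map scanned once with a min-rank accumulator, the final rank indexing the category list.
import Mathlib
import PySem

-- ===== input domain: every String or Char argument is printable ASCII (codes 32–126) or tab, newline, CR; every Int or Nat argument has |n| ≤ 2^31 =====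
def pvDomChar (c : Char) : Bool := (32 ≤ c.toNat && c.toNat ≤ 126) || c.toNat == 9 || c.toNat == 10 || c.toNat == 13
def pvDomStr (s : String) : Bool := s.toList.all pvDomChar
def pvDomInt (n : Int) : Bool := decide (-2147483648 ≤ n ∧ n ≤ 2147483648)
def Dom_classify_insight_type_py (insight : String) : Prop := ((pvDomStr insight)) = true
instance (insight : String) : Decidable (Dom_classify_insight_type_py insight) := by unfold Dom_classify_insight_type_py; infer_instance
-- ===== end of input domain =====

-- B replaces the grouped if/elif chain by a flat keyword→rank map scanned once
-- with a min-rank accumulator that indexes the category list (objective: alternative).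
-- ===== PORT A =====
def classify_insight_type_py (insight : String) : String :=
  let insight_lower := PySem.Str.lower insight
  if ["timing", "time", "delay", "duration"].any (fun word => PySem.Str.isIn word insight_lower) then
    "temporal"
  else if ["resource", "memory", "cpu", "limit"].any (fun word => PySem.Str.isIn word insight_lower) then
    "resource_management"
  else if ["context", "environment", "namespace", "cluster"].any (fun word => PySem.Str.isIn word insight_lower) then
    "context_awareness"
  else if ["strategy", "approach", "algorithm"].any (fun word => PySem.Str.isIn word insight_lower) then
    "strategy_optimization"
  else if ["pattern", "correlation", "relationship"].any (fun word => PySem.Str.isIn word insight_lower) then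
    "pattern_recognition"
  else
    "general"

-- ===== PORT B =====
def pvRank : List (String × Nat) :=
  [ ("timing", 0), ("time", 0), ("delay", 0), ("duration", 0),
    ("resource", 1), ("memory", 1), ("cpu", 1), ("limit", 1),
    ("context", 2), ("environment", 2), ("namespace", 2), ("cluster", 2),
    ("strategy", 3), ("approach", 3), ("algorithm", 3),
    ("pattern", 4), ("correlation", 4), ("relationship", 4) ]

def pvCategories : List String :=
  ["temporal", "resource_management", "context_awareness",
   "strategy_optimization", "pattern_recognition", "general"]

def classify_insight_type_py_alt (insight : String) : String :=
  let s := PySem.Str.lower insight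
  let best := pvRank.foldl
    (fun b wr => if wr.2 < b ∧ PySem.Str.isIn wr.1 s then wr.2 else b)
    (pvCategories.length - 1)
  pvCategories.getD best "general"

-- ===== PRECONDITION & SPEC =====
def Spec_classify_insight_type_py (insight : String) (out : String) : Prop := out = classify_insight_type_py_alt insight
instance (insight : String) (out : String) : Decidable (Spec_classify_insight_type_py insight out) := by unfold Spec_classify_insight_type_py; infer_instance

-- ===== CLAIM (what is proved, stated in full; the proofs are below) =====
def Claim_equal_classify_insight_type_py : Prop := ∀ (insight : String), Dom_classify_insight_type_py insight → Spec_classify_insight_type_py insight (classify_insight_type_py insight)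

-- ===== LEMMAS AND PROOFS =====

-- Folding B's min-rank step over one constant-rank group reduces to that group's `any`.
theorem pv_fold_group (q : String → Bool) (ws : List String) (p : Nat) (best : Nat) :
    List.foldl (fun b wr => if wr.2 < b ∧ q wr.1 then wr.2 else b) best
      (ws.map (fun w => (w, p))) =
    if p < best ∧ ws.any q then p else best := by
  induction ws generalizing best with
  | nil => simp
  | cons w ws ih =>
    simp only [List.map_cons, List.foldl_cons, List.any_cons, Bool.or_eq_true, ih]
    by_cases hq : q w = true
    · by_cases hp : p < best
      · simp [hq, hp]
      · simp [hq, hp]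
    · simp [hq]

theorem pv_fold_group' (s : String) (ws : List String) (p : Nat) (best : Nat) :
    List.foldl (fun b wr => if wr.2 < b ∧ PySem.Str.isIn wr.1 s then wr.2 else b) best
      (ws.map (fun w => (w, p))) =
    if p < best ∧ ws.any (fun w => PySem.Str.isIn w s) then p else best :=
  pv_fold_group (fun w => PySem.Str.isIn w s) ws p best

theorem classify_len : pvCategories.length - 1 = 5 := by decide

theorem classify_spec_aux (insight : String) :
    classify_insight_type_py insight = classify_insight_type_py_alt insight := by
  unfold classify_insight_type_py classify_insight_type_py_alt
  have hsplit : pvRank =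
      (["timing", "time", "delay", "duration"].map (fun w => (w, 0))) ++
      (["resource", "memory", "cpu", "limit"].map (fun w => (w, 1))) ++
      (["context", "environment", "namespace", "cluster"].map (fun w => (w, 2))) ++
      (["strategy", "approach", "algorithm"].map (fun w => (w, 3))) ++
      (["pattern", "correlation", "relationship"].map (fun w => (w, 4))) := by rfl
  rw [hsplit, classify_len]
  simp only [List.foldl_append, pv_fold_group']
  set s := PySem.Str.lower insight with hs
  by_cases g0 : ["timing", "time", "delay", "duration"].any (fun w => PySem.Str.isIn w s) = true <;>
  by_cases g1 : ["resource", "memory", "cpu", "limit"].any (fun w => PySem.Str.isIn w s) = true <;>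
  by_cases g2 : ["context", "environment", "namespace", "cluster"].any (fun w => PySem.Str.isIn w s) = true <;>
  by_cases g3 : ["strategy", "approach", "algorithm"].any (fun w => PySem.Str.isIn w s) = true <;>
  by_cases g4 : ["pattern", "correlation", "relationship"].any (fun w => PySem.Str.isIn w s) = true <;>
  simp only [g0, g1, g2, g3, g4] <;> norm_num [pvCategories]

-- ===== VERDICT (by name: the statement is the Claim_ definition above) =====
theorem classify_insight_type_py_spec : Claim_equal_classify_insight_type_py := by
  intro insight _
  unfold Spec_classify_insight_type_py
  exact classify_spec_aux insight
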